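-- pv_equiv track=rewrite | github.com/HelloSSIFI/HelloWorld | programmers/Lv2_방문_길이/s1_lbefull.py | solution
-- ===== SOURCE A (Python) =====
-- def solution(dirs):
--     answer = set()
--     mv = {'U': [0, 1], 'D': [0, -1], 'R': [1, 0], 'L': [-1, 0]}     # 명령어별 이동을 저장
--     x = y = 0                                                       # 초기 위치
--     for d in dirs:
--         nx = x + mv[d][0]                                           # 명령어대로 이동한 위치를 nx, ny로 저장
--         ny = y + mv[d][1]
--         if -5 <= nx <= 5 and -5 <= ny <= 5:                         # nx, ny가 좌표를 벗어나지 않으면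
--             if d in 'UR':                                           # 좌표가 오름차순으로 작은 쪽에서 큰 쪽으로 가는 순서대로 튜플을 만들어서
--                 answer.add((x, y, nx, ny))                          # answer에 추가
--             else:
--                 answer.add((nx, ny, x, y))
--             x, y = nx, ny                                           # 새로운 좌표를 가지고 다음 명령어 반복
--
--     return len(answer)
-- ===== SOURCE B (Python) =====
-- def solution(dirs):
--     # Stage 1: build the list of visited positions (the clipped walk).
--     delta = {'U': (0, 1), 'D': (0, -1), 'R': (1, 0), 'L': (-1, 0)}
--     path = [(0, 0)]
--     for d in dirs:
--         dx, dy = delta[d]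
--         x, y = path[-1]
--         nx, ny = x + dx, y + dy
--         if -5 <= nx <= 5 and -5 <= ny <= 5:
--             path.append((nx, ny))
--     # Stage 2: count distinct undirected segments between consecutive positions,
--     # canonicalized by tuple order instead of by move direction.
--     return len({min(p, q) + max(p, q) for p, q in zip(path, path[1:])})
-- ===== Notes on version B (the rewrite author's own statement) =====
-- stated objective: alternative
-- what changed: B replaces A's single-pass set accumulation with a canonical-orientation branch by two stages: first build the explicit list of visited positions (the clipped walk), then count distinct segments with a set comprehension over zip(path, path[1:]) canonicalized by tuple min/max instead of by move direction.
import Mathlib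
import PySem

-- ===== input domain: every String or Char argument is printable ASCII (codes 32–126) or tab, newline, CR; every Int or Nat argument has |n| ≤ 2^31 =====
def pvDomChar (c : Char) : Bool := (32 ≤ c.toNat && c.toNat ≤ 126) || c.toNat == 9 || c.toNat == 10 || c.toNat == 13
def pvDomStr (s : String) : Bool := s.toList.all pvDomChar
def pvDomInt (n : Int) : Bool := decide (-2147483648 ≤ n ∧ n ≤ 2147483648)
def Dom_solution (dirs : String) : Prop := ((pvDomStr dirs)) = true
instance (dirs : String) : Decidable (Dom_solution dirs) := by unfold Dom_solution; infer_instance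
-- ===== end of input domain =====

-- B restructures A into two stages: build the list of visited positions, then count
-- distinct segments canonicalized by tuple min/max over consecutive-position pairs
-- (objective: alternative decomposition; same cost).

-- ===== PORT A =====
-- the mv dictionary; lookup of a key not present is KeyError, excluded by Pre_solution
def pvMv : PySem.Dict Char (List Int) :=
  PySem.Dict.ofList [('U', [0, 1]), ('D', [0, -1]), ('R', [1, 0]), ('L', [-1, 0])]

def pvStepA (st : PySem.Set (Int × Int × Int × Int) × Int × Int) (d : Char) :
    PySem.Set (Int × Int × Int × Int) × Int × Int :=
  let (answer, x, y) := st
  let m := pvMv.getD d []                       -- mv[d]; KeyError outside Pre_solution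
  let nx := x + PySem.List.pyGetD m 0 0
  let ny := y + PySem.List.pyGetD m 1 0
  if -5 ≤ nx ∧ nx ≤ 5 ∧ -5 ≤ ny ∧ ny ≤ 5 then
    if d = 'U' ∨ d = 'R' then                   -- d in 'UR' (d is a single character)
      (PySem.Set.add answer (x, y, nx, ny), nx, ny)
    else
      (PySem.Set.add answer (nx, ny, x, y), nx, ny)
  else (answer, x, y)

def solution (dirs : String) : Int :=
  let st := dirs.toList.foldl pvStepA (PySem.Set.empty, 0, 0)
  (PySem.Set.len st.1 : Int)

-- ===== PORT B =====
-- the delta dictionary; lookup of a key not present is KeyError, excluded by Pre_solution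
def pvDelta : PySem.Dict Char (Int × Int) :=
  PySem.Dict.ofList [('U', (0, 1)), ('D', (0, -1)), ('R', (1, 0)), ('L', (-1, 0))]

-- Python's lexicographic ≤ on pairs of ints (what min/max on 2-tuples compare by)
def pvTupLe (p q : Int × Int) : Bool := p.1 < q.1 || (p.1 == q.1 && p.2 ≤ q.2)

-- min(p, q) + max(p, q): tuple concatenation of the two canonical endpoints
def pvSeg (p q : Int × Int) : Int × Int × Int × Int :=
  let lo := if pvTupLe p q then p else q       -- min(p, q): first argument on ties
  let hi := if pvTupLe q p then p else q       -- max(p, q): first argument on ties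
  (lo.1, lo.2, hi.1, hi.2)

-- one loop iteration of stage 1: append the next in-bounds position to the path
def pvStepP (path : List (Int × Int)) (d : Char) : List (Int × Int) :=
  let dxy := pvDelta.getD d (0, 0)              -- delta[d]; KeyError outside Pre_solution
  let xy := PySem.List.pyGetD path (-1) (0, 0)  -- path[-1]; path is never empty
  let nx := xy.1 + dxy.1
  let ny := xy.2 + dxy.2
  if -5 ≤ nx ∧ nx ≤ 5 ∧ -5 ≤ ny ∧ ny ≤ 5 then path ++ [(nx, ny)] else path

def solution_alt (dirs : String) : Int :=
  let path := dirs.toList.foldl pvStepP [(0, 0)]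
  let segs := (path.zip path.tail).map (fun pq => pvSeg pq.1 pq.2)
  (PySem.Set.len (PySem.Set.ofList segs) : Int)

-- ===== PRECONDITION & SPEC =====
-- Pre_ excludes strings containing a character that is not one of the four move commands U, D, R, L:
-- on such a character the dictionary lookup raises KeyError (in A and in B alike).
def Pre_solution (dirs : String) : Prop :=
  (dirs.toList.all (fun d => d == 'U' || d == 'D' || d == 'R' || d == 'L')) = true
instance (dirs : String) : Decidable (Pre_solution dirs) := by unfold Pre_solution; infer_instance
def pvWitness_solution : String := "URDL"

def Spec_solution (dirs : String) (out : Int) : Prop := out = solution_alt dirs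
instance (dirs : String) (out : Int) : Decidable (Spec_solution dirs out) := by unfold Spec_solution; infer_instance

-- ===== CLAIM (what is proved, stated in full; the proofs are below) =====
def Claim_equal_solution : Prop := ∀ (dirs : String), Dom_solution dirs → Pre_solution dirs → Spec_solution dirs (solution dirs)

-- ===== LEMMAS AND PROOFS =====

-- the sequence of canonical edge tuples A inserts, as a list
def pvEdges : Int → Int → List Char → List (Int × Int × Int × Int)
  | _, _, [] => []
  | x, y, d :: ds =>
    let m := pvMv.getD d []
    let nx := x + PySem.List.pyGetD m 0 0
    let ny := y + PySem.List.pyGetD m 1 0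
    if -5 ≤ nx ∧ nx ≤ 5 ∧ -5 ≤ ny ∧ ny ≤ 5 then
      (if d = 'U' ∨ d = 'R' then (x, y, nx, ny) else (nx, ny, x, y)) :: pvEdges nx ny ds
    else pvEdges x y ds

-- A's loop: the final set is the fold of Set.add over that edge list
theorem pvA_fold (ds : List Char) : ∀ (s : PySem.Set (Int × Int × Int × Int)) (x y : Int),
    (ds.foldl pvStepA (s, x, y)).1 = (pvEdges x y ds).foldl PySem.Set.add s := by
  induction ds with
  | nil => intro s x y; rfl
  | cons d ds ih =>
    intro s x y
    simp only [List.foldl_cons, pvStepA, pvEdges]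
    split_ifs with h hd <;> (try simp only [List.foldl_cons]) <;> exact ih ..

-- B's stage-2 segment list of a path
def pvSegs (path : List (Int × Int)) : List (Int × Int × Int × Int) :=
  (path.zip path.tail).map (fun pq => pvSeg pq.1 pq.2)

theorem pvSegs_cons_cons (a b : Int × Int) (m : List (Int × Int)) :
    pvSegs (a :: b :: m) = pvSeg a b :: pvSegs (b :: m) := rfl

theorem pvSegs_snoc (l : List (Int × Int)) (x p : Int × Int) :
    pvSegs (l ++ [x, p]) = pvSegs (l ++ [x]) ++ [pvSeg x p] := by
  induction l with
  | nil => rfl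
  | cons a l ih =>
    cases l with
    | nil => rfl
    | cons b l' =>
      simp only [List.cons_append, pvSegs_cons_cons] at *
      rw [ih]

-- the displacement the two dictionaries deliver is the same, and B's canonical segment
-- equals A's direction-branched tuple, for every character (defaults included)
theorem pvStep_tuple (d : Char) (x y : Int) :
    (pvDelta.getD d (0, 0)).1 = PySem.List.pyGetD (pvMv.getD d []) 0 0 ∧
    (pvDelta.getD d (0, 0)).2 = PySem.List.pyGetD (pvMv.getD d []) 1 0 ∧
    pvSeg (x, y) (x + (pvDelta.getD d (0, 0)).1, y + (pvDelta.getD d (0, 0)).2) =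
      (if d = 'U' ∨ d = 'R' then
        (x, y, x + (pvDelta.getD d (0, 0)).1, y + (pvDelta.getD d (0, 0)).2)
      else
        (x + (pvDelta.getD d (0, 0)).1, y + (pvDelta.getD d (0, 0)).2, x, y)) := by
  by_cases hU : d = 'U'
  · subst hU
    refine ⟨by decide, by decide, ?_⟩
    rw [show pvDelta.getD 'U' (0, 0) = ((0 : Int), (1 : Int)) by decide]
    simp only [pvSeg, pvTupLe, Bool.or_eq_true, Bool.and_eq_true, decide_eq_true_eq, beq_iff_eq]
    split_ifs <;> simp_all
  · by_cases hD : d = 'D'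
    · subst hD
      refine ⟨by decide, by decide, ?_⟩
      rw [show pvDelta.getD 'D' (0, 0) = ((0 : Int), (-1 : Int)) by decide]
      simp only [pvSeg, pvTupLe, Bool.or_eq_true, Bool.and_eq_true, decide_eq_true_eq, beq_iff_eq]
      split_ifs <;> simp_all
    · by_cases hR : d = 'R'
      · subst hR
        refine ⟨by decide, by decide, ?_⟩
        rw [show pvDelta.getD 'R' (0, 0) = ((1 : Int), (0 : Int)) by decide]
        simp only [pvSeg, pvTupLe, Bool.or_eq_true, Bool.and_eq_true, decide_eq_true_eq, beq_iff_eq]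
        split_ifs <;> simp_all
      · by_cases hL : d = 'L'
        · subst hL
          refine ⟨by decide, by decide, ?_⟩
          rw [show pvDelta.getD 'L' (0, 0) = ((-1 : Int), (0 : Int)) by decide]
          simp only [pvSeg, pvTupLe, Bool.or_eq_true, Bool.and_eq_true, decide_eq_true_eq, beq_iff_eq]
          split_ifs <;> simp_all
        · -- d is not a key of either dictionary: both displacements default to (0, 0)
          have hA : pvMv.getD d [] = [] := by
            rw [show pvMv = PySem.Dict.mk [('U', [0, 1]), ('D', [0, -1]), ('R', [1, 0]),
              ('L', [-1, 0])] by decide]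
            simp [PySem.Dict.getD, PySem.Dict.get?, beq_iff_eq,
              Ne.symm hU, Ne.symm hD, Ne.symm hR, Ne.symm hL]
          have hB : pvDelta.getD d (0, 0) = (0, 0) := by
            rw [show pvDelta = PySem.Dict.mk [('U', (0, 1)), ('D', (0, -1)), ('R', (1, 0)),
              ('L', (-1, 0))] by decide]
            simp [PySem.Dict.getD, PySem.Dict.get?, beq_iff_eq,
              Ne.symm hU, Ne.symm hD, Ne.symm hR, Ne.symm hL]
          rw [hA, hB]
          refine ⟨rfl, rfl, ?_⟩
          simp only [pvSeg, pvTupLe, Bool.or_eq_true, Bool.and_eq_true, decide_eq_true_eq,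
            beq_iff_eq, hU, hR]
          split_ifs <;> simp_all

-- B's loop, stage 1 then stage 2: the segment list grows by exactly A's edge list
theorem pvB_fold (ds : List Char) : ∀ (pre : List (Int × Int)) (x y : Int),
    pvSegs (ds.foldl pvStepP (pre ++ [(x, y)])) = pvSegs (pre ++ [(x, y)]) ++ pvEdges x y ds := by
  induction ds with
  | nil => intro pre x y; simp [pvEdges]
  | cons d ds ih =>
    intro pre x y
    obtain ⟨h1, h2, h3⟩ := pvStep_tuple d x y
    simp only [List.foldl_cons, pvStepP, pvEdges,
      PySem.List.pyGetD_neg_one_append_singleton, ← h1, ← h2]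
    by_cases h : -5 ≤ x + (pvDelta.getD d (0, 0)).1 ∧ x + (pvDelta.getD d (0, 0)).1 ≤ 5 ∧
        -5 ≤ y + (pvDelta.getD d (0, 0)).2 ∧ y + (pvDelta.getD d (0, 0)).2 ≤ 5
    · rw [if_pos h, if_pos h]
      rw [ih (pre ++ [(x, y)]) (x + (pvDelta.getD d (0, 0)).1) (y + (pvDelta.getD d (0, 0)).2)]
      rw [show (pre ++ [(x, y)]) ++ [(x + (pvDelta.getD d (0, 0)).1, y + (pvDelta.getD d (0, 0)).2)]
          = pre ++ [(x, y), (x + (pvDelta.getD d (0, 0)).1, y + (pvDelta.getD d (0, 0)).2)] by simp]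
      rw [pvSegs_snoc, h3]
      simp
    · rw [if_neg h, if_neg h]
      exact ih pre x y

-- ===== VERDICT (by name: the statement is the Claim_ definition above) =====
theorem solution_spec : Claim_equal_solution := by
  intro dirs _ _
  unfold Spec_solution solution solution_alt
  show PySem.Set.len ((dirs.toList.foldl pvStepA (PySem.Set.empty, 0, 0)).1) =
    PySem.Set.len (PySem.Set.ofList (pvSegs (dirs.toList.foldl pvStepP [(0, 0)])))
  rw [pvA_fold, show pvSegs (dirs.toList.foldl pvStepP [(0, 0)])
      = pvSegs [(0, 0)] ++ pvEdges 0 0 dirs.toList from pvB_fold dirs.toList [] 0 0]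
  rfl
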